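-- pv_equiv track=rewrite | github.com/hosseynzaare/SUT-fifth-practices | tamrin-5(4).py | find
-- ===== SOURCE A (Python) =====
-- def find(n, text, word2):
--     words = text.split()
--     word3 = word2.lower()
--     lst = []
--     for word in words:
--         word4 = word.lower()
--         while len(word3) > len(word4):
--             word4 += "_"
--         while len(word4) > len(word3):
--             word3 += "_"
--         distance = 0
--         for i in range(len(word3)):
--             if word3[i]!=word4[i]:
--                 distance+=1
--         if distance <= n:
--             lst.append(word)
--     return lst
-- ===== SOURCE B (Python) =====
-- def find(n, text, word2):
--     w2 = word2.lower()
--     out = []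
--     for word in text.split():
--         w = word.lower()
--         d = sum(1 for a, b in zip(w2, w) if a != b)
--         tail = w[len(w2):] if len(w) > len(w2) else w2[len(w):]
--         d += sum(1 for c in tail if c != '_')
--         if d <= n:
--             out.append(word)
--     return out
-- ===== Notes on version B (the rewrite author's own statement) =====
-- stated objective: simpler
-- what changed: B drops A's persistent, ever-growing word3 accumulator and both '_'-padding while-loops: it lowercases word2 once and computes the distance directly as mismatches over zip(w2, w) plus the count of non-'_' characters in the tail of the longer string, which is provably equal to A's padded indexed scan for any amount of accumulated padding.
import Mathlib
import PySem

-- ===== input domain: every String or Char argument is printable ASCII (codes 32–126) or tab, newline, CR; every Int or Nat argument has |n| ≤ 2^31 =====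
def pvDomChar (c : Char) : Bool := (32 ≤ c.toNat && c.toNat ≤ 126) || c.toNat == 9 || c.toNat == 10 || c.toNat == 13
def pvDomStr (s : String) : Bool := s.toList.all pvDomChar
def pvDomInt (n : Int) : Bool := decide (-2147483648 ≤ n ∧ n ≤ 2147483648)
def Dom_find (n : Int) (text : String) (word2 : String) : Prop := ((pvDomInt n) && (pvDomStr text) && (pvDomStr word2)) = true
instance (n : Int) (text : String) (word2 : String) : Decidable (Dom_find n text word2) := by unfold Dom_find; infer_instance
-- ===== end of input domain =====

-- B replaces A's persistent growing '_'-padded accumulator and its two padding while-loops by a direct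
-- zip-mismatch count plus a non-'_' tail count (same return value; objective: simpler).

-- ===== PORT A =====
-- while len(short) < target: short += "_"
def findPad (w : List Char) (t : Nat) : List Char :=
  if w.length < t then findPad (w ++ ['_']) t else w
termination_by t - w.length
decreasing_by simp_all; omega

-- one iteration of A's for-loop; state = (word3, lst)
def findStep (n : Int) (st : List Char × List String) (word : String) : List Char × List String :=
  let word4 := PySem.Chars.lower word.toList
  let word4 := findPad word4 st.1.length
  let word3 := findPad st.1 word4.length
  let distance : Int :=
    (List.range word3.length).foldl
      (fun d i => if word3.getD i ' ' != word4.getD i ' ' then d + 1 else d) 0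
  if distance ≤ n then (word3, st.2 ++ [word]) else (word3, st.2)

def find (n : Int) (text : String) (word2 : String) : List String :=
  let words := PySem.Str.split₀ text
  let word3 := PySem.Chars.lower word2.toList
  (words.foldl (findStep n) (word3, [])).2

-- ===== PORT B =====
def findAltStep (n : Int) (w2 : List Char) (out : List String) (word : String) : List String :=
  let w := PySem.Chars.lower word.toList
  let d1 := (w2.zip w).countP (fun p => p.1 != p.2)
  let tail := if w2.length < w.length then w.drop w2.length else w2.drop w.length
  let d : Int := (d1 : Int) + (tail.countP (fun c => c != '_') : Int)
  if d ≤ n then out ++ [word] else out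

def find_alt (n : Int) (text : String) (word2 : String) : List String :=
  let w2 := PySem.Chars.lower word2.toList
  (PySem.Str.split₀ text).foldl (findAltStep n w2) []

-- ===== PRECONDITION & SPEC =====
def Spec_find (n : Int) (text : String) (word2 : String) (out : List String) : Prop := out = find_alt n text word2
instance (n : Int) (text : String) (word2 : String) (out : List String) : Decidable (Spec_find n text word2 out) := by unfold Spec_find; infer_instance

-- ===== CLAIM (what is proved, stated in full; the proofs are below) =====
def Claim_equal_find : Prop := ∀ (n : Int) (text : String) (word2 : String), Dom_find n text word2 → Spec_find n text word2 (find n text word2)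

-- ===== LEMMAS AND PROOFS =====

-- structural mismatch count (proof vehicle linking both ports)
def mism : List Char → List Char → Nat
  | a :: as, b :: bs => (if a ≠ b then 1 else 0) + mism as bs
  | _, _ => 0

theorem findPad_eq (w : List Char) (t : Nat) :
    findPad w t = w ++ List.replicate (t - w.length) '_' := by
  unfold findPad
  split
  · rename_i h
    rw [findPad_eq (w ++ ['_']) t]
    have : t - w.length = (t - (w ++ ['_']).length) + 1 := by simp; omega
    rw [this, List.replicate_succ]
    simp
  · rename_i h
    have : t - w.length = 0 := by omega
    simp [this]
termination_by t - w.length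
decreasing_by simp_all; omega

theorem mism_zip (w2 w : List Char) :
    mism w2 w = (w2.zip w).countP (fun p => p.1 != p.2) := by
  induction w2 generalizing w with
  | nil => cases w <;> simp [mism]
  | cons a as ih =>
    cases w with
    | nil => simp [mism]
    | cons b bs =>
      simp [mism, ih bs, List.countP_cons]
      by_cases h : a = b <;> simp [h] <;> omega

theorem mism_rep_rep (k : Nat) :
    mism (List.replicate k '_') (List.replicate k '_') = 0 := by
  induction k with
  | zero => simp [mism]
  | succ m ih => simp [List.replicate_succ, mism, ih]

theorem mism_rep_left (w : List Char) (m k : Nat) (h : k = w.length + m) :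
    mism (List.replicate k '_') (w ++ List.replicate m '_') = w.countP (fun c => c != '_') := by
  induction w generalizing k with
  | nil => simp at h; simp [h, mism_rep_rep]
  | cons c cs ih =>
    have : k = (cs.length + m) + 1 := by simp at h; omega
    subst this
    rw [List.replicate_succ]
    simp only [List.cons_append, mism, ih (cs.length + m) rfl, List.countP_cons]
    by_cases hc : c = '_'
    · simp [hc]
    · simp [hc, Ne.symm hc]; omega

theorem mism_rep_right (w : List Char) (k m : Nat) (h : m = w.length + k) :
    mism (w ++ List.replicate k '_') (List.replicate m '_') = w.countP (fun c => c != '_') := by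
  induction w generalizing m with
  | nil => simp at h; simp [h, mism_rep_rep]
  | cons c cs ih =>
    have : m = (cs.length + k) + 1 := by simp at h; omega
    subst this
    rw [List.replicate_succ]
    simp only [List.cons_append, mism, ih (cs.length + k) rfl, List.countP_cons]
    by_cases hc : c = '_'
    · simp [hc]
    · simp [hc]; omega

-- the key fact: padded mismatch count = zip mismatches + non-'_' tail, for ANY pad amounts
theorem mism_pad (w2 w : List Char) (k m : Nat) (h : w2.length + k = w.length + m) :
    mism (w2 ++ List.replicate k '_') (w ++ List.replicate m '_')
      = mism w2 w +
        (if w2.length < w.length then (w.drop w2.length).countP (fun c => c != '_')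
         else (w2.drop w.length).countP (fun c => c != '_')) := by
  induction w2 generalizing w with
  | nil =>
    cases w with
    | nil => simp at h; simp [mism, h, mism_rep_rep]
    | cons b bs =>
      simp only [List.nil_append, mism]
      rw [mism_rep_left (b :: bs) m k (by simp at h ⊢; omega)]
      simp
  | cons a as ih =>
    cases w with
    | nil =>
      simp only [List.nil_append, mism]
      rw [mism_rep_right (a :: as) k m (by simp at h ⊢; omega)]
      simp
    | cons b bs =>
      simp only [List.cons_append, mism]
      rw [ih bs (by simp at h ⊢; omega)]
      simp only [List.length_cons, List.drop_succ_cons]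
      have : as.length < bs.length ↔ as.length + 1 < bs.length + 1 := by omega
      by_cases hlt : as.length < bs.length
      · simp [hlt, this.mp hlt]
        omega
      · have : ¬ (as.length + 1 < bs.length + 1) := by omega
        simp [hlt, this]
        omega

-- A's indexed distance fold equals mism on equal-length lists
theorem range_count_eq_mism (w3 w4 : List Char) (h : w4.length = w3.length) :
    ((List.range w3.length).foldl
      (fun d i => if w3.getD i ' ' != w4.getD i ' ' then d + 1 else d) (0 : Int))
      = (mism w3 w4 : Int) := by
  rw [PySem.List.foldl_count_if (fun i => w3.getD i ' ' != w4.getD i ' ') (List.range w3.length) 0]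
  simp only [Int.zero_add, Int.natCast_inj]
  induction w3 generalizing w4 with
  | nil => simp [mism]
  | cons a as ih =>
    cases w4 with
    | nil => simp at h
    | cons b bs =>
      simp only [List.length_cons, List.range_succ_eq_map, List.countP_cons, List.countP_map,
        mism]
      have hb : bs.length = as.length := by simpa using h
      have := ih bs hb
      have hfun : (List.countP ((fun i => (a :: as).getD i ' ' != (b :: bs).getD i ' ') ∘ (· + 1)) (List.range as.length))
          = List.countP (fun i => as.getD i ' ' != bs.getD i ' ') (List.range as.length) := by
        apply List.countP_congr
        intro i _
        simp [Function.comp]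
      rw [hfun, this]
      by_cases hab : a = b <;> simp [hab] <;> omega

-- one loop step of A, with word3 = lowered word2 plus k pads, matches B's step and keeps the invariant
theorem step_eq (n : Int) (w2 : List Char) (k : Nat) (acc : List String) (word : String) :
    ∃ k', findStep n (w2 ++ List.replicate k '_', acc) word
      = (w2 ++ List.replicate k' '_', findAltStep n w2 acc word) := by
  unfold findStep findAltStep
  dsimp only
  rw [findPad_eq, findPad_eq]
  set w := PySem.Chars.lower word.toList with hw
  set L1 := (w2 ++ List.replicate k '_').length with hL1
  have hlen1 : L1 = w2.length + k := by simp [hL1]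
  set m := L1 - w.length with hm
  set w4 := w ++ List.replicate m '_' with hw4
  have hlen4 : w4.length = max w.length L1 := by simp [hw4, hm]; omega
  set k' : Nat := k + (w4.length - L1) with hk'
  have hpad : (w2 ++ List.replicate k '_') ++ List.replicate (w4.length - L1) '_'
      = w2 ++ List.replicate k' '_' := by
    rw [List.append_assoc, ← List.replicate_add]
  rw [hpad]
  have hlen3 : w4.length = (w2 ++ List.replicate k' '_').length := by
    simp [hk', hlen1] at hlen4 ⊢
    omega
  refine ⟨k', ?_⟩
  rw [range_count_eq_mism (w2 ++ List.replicate k' '_') w4 hlen3]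
  rw [hw4, mism_pad w2 w k' m (by simp [hk', hlen1] at hlen4 ⊢; omega)]
  rw [mism_zip]
  push_cast
  split_ifs <;> rfl

-- the whole loop: A's fold with any accumulated padding projects to B's fold
theorem loop_eq (n : Int) (w2 : List Char) (words : List String) :
    ∀ (k : Nat) (acc : List String),
      (words.foldl (findStep n) (w2 ++ List.replicate k '_', acc)).2
        = words.foldl (findAltStep n w2) acc := by
  induction words with
  | nil => intro k acc; rfl
  | cons word rest ih =>
    intro k acc
    obtain ⟨k', hstep⟩ := step_eq n w2 k acc word
    simp only [List.foldl_cons, hstep, ih]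

-- ===== VERDICT (by name: the statement is the Claim_ definition above) =====
theorem find_spec : Claim_equal_find := by
  intro n text word2 _
  unfold Spec_find find find_alt
  have := loop_eq n (PySem.Chars.lower word2.toList) (PySem.Str.split₀ text) 0 []
  simpa using this
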